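-- pv_equiv track=rewrite | github.com/wongcheehao/FIT3155 | A1/q1/q1.py | rightToLeft_Z_algo
-- ===== SOURCE A (Python) =====
-- def rightToLeft_Z_algo(s: str):
--     """
--     Implements Gusfield's Z-Algorithm in reverse similar to Z_algo
--     By running the Z-Algorithm from right to left, we are able to compute the z-values,
--     where the z-value is the length of the longest substring ending at position i of pat
--     that matches its suffix
--     """
--
--     n = len(s)
--     if n == 0:
--         return []  # Handle the case when the string is empty
--     Z = [0] * n
--     Z[-1] = None  # Z[-1] is always None
--
--     l, r = n - 1, n - 1  # Initialize the rightmost Z-box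
--
--     for k in range(n - 2, -1, -1):
--         # Case 1, k is outside the Z-box
--         if k < r:
--             n_matches = n-1
--             counter = 0
--
--             while k - counter >= 0 and s[n_matches] == s[k - counter]:
--                 n_matches -= 1
--                 counter += 1
--                 if n_matches == 0 or k - counter < 0:
--                     break
--
--             # Update the Z value
--             Z[k] = counter
--
--             # if n_matches > 0:
--             l = k
--             r = k - counter + 1
--
--         else:  # Case 2
--             k_prime = n - 1 - (l - k) # k' = k - l, Python starts from index 0
--             remaining = k - r + 1
--
--             if Z[k_prime] < remaining:  # Case 2a
--                 Z[k] = Z[k_prime]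
--
--             elif Z[k_prime] == remaining:  # Case 2b
--                 n_matches = n - 1 - remaining # the matches we already know from Z-box
--                 counter = remaining
--
--                 if k - counter >= 0:
--                     while s[k-counter] == s[n_matches]:
--                         n_matches -= 1
--                         counter += 1
--                         if n_matches == 0 or k - counter < 0:
--                             break
--
--                 # Update the Z value = n_matches
--                 Z[k] = counter
--
--                 # if n_matches > remaining:  # Update the l and r of Z-box if we found more matches outside from the Z-box
--                 l = k
--                 r = k + counter - 1
--
--             else:  # Case 2c
--                 Z[k] = remaining
--
--     return Z
-- ===== SOURCE B (Python) =====
-- def rightToLeft_Z_algo(s: str):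
--     # Simpler naive reverse-Z: scan each position independently; no Z-box.
--     n = len(s)
--     if n == 0:
--         return []
--     Z = []
--     for k in range(n - 1):
--         j = 0
--         while k - j >= 0 and s[k - j] == s[n - 1 - j]:
--             j += 1
--         Z.append(j)
--     Z.append(None)
--     return Z
-- ===== Notes on version B (the rewrite author's own statement) =====
-- stated objective: simpler
-- what changed: Replaced Gusfield's reverse Z-box bookkeeping (l/r box, case 1/2a/2b/2c reuse of earlier Z-values) with a plain independent backward scan at each position.
import Mathlib
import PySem

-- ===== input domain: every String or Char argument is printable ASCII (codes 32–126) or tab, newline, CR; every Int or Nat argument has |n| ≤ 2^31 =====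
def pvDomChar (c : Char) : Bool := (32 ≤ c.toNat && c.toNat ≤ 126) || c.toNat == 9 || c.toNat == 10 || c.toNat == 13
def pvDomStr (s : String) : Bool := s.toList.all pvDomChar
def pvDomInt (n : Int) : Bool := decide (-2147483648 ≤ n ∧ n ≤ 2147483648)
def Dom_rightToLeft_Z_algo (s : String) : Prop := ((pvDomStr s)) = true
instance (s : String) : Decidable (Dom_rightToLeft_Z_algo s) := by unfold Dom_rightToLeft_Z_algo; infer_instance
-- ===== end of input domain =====

-- B replaces A's reverse Z-box bookkeeping by an independent naive backward scan per
-- position (same values everywhere; neither is asymptotically faster, objective: simpler).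
-- Indexing note: every s[i] both Pythons perform has 0 ≤ i < len(s) (established by the
-- proofs below), so `cs.getD i ' '` is exact for Python's s[i] in these ports.

-- ===== PORT A =====
-- Case-1 while loop of A: n_matches starts at n-1, counter at 0; the loop condition is
-- `k - counter >= 0 and s[n_matches] == s[k - counter]`, with the two in-loop breaks.
def pvScan1 (cs : List Char) (k nm c : Nat) : Nat :=
  if _h : c ≤ k ∧ cs.getD nm ' ' = cs.getD (k - c) ' ' then
    if _h2 : nm - 1 = 0 ∨ k < c + 1 then c + 1
    else pvScan1 cs k (nm - 1) (c + 1)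
  else c
termination_by k + 1 - c
decreasing_by omega

-- Case-2b while loop of A: same body, but the bound check `k - counter >= 0` is only the
-- in-loop break (the loop is entered under `if k - counter >= 0`).
def pvScan2 (cs : List Char) (k nm c : Nat) : Nat :=
  if cs.getD (k - c) ' ' = cs.getD nm ' ' then
    if _h2 : nm - 1 = 0 ∨ k < c + 1 then c + 1
    else pvScan2 cs k (nm - 1) (c + 1)
  else c
termination_by k + 1 - c
decreasing_by omega

-- One iteration of A's `for k in range(n-2, -1, -1)` body, returning (Z, l, r).
-- A's Z list is carried as the List Nat of its first n-1 entries (all the ints); the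
-- constant trailing Z[-1] = None is re-attached on return.  Python's `k - counter + 1`
-- and `k - r + 1` are written `k + 1 - counter` / `k + 1 - r` (equal over ℤ; Nat-safe).
def pvStep (cs : List Char) (n : Nat) (Z : List Nat) (l r k : Nat) :
    List Nat × Nat × Nat :=
  if k < r then
    let counter := pvScan1 cs k (n - 1) 0
    (Z.set k counter, k, k + 1 - counter)
  else
    let kp := n - 1 - (l - k)
    let rem := k + 1 - r
    if Z.getD kp 0 < rem then (Z.set k (Z.getD kp 0), l, r)
    else if Z.getD kp 0 = rem then
      let counter := if rem ≤ k then pvScan2 cs k (n - 1 - rem) rem else rem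
      (Z.set k counter, k, k + counter - 1)
    else (Z.set k rem, l, r)

-- A's main loop, k counting down from n-2 to 0.
def pvLoopA (cs : List Char) (n : Nat) (Z : List Nat) (l r k : Nat) : List Nat :=
  match k with
  | 0 => (pvStep cs n Z l r 0).1
  | k' + 1 =>
    pvLoopA cs n (pvStep cs n Z l r (k' + 1)).1
      (pvStep cs n Z l r (k' + 1)).2.1 (pvStep cs n Z l r (k' + 1)).2.2 k'

def rightToLeft_Z_algo (s : String) : List (Option Int) :=
  let cs := s.toList
  let n := cs.length
  if n = 0 then []
  else if n = 1 then [none]   -- range(n-2, -1, -1) is empty: Z = [None]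
  else (pvLoopA cs n (List.replicate (n - 1) 0) (n - 1) (n - 1) (n - 2)).map
        (fun z => some ((z : Nat) : Int)) ++ [none]

-- ===== PORT B =====
-- B's inner while loop: `while k - j >= 0 and s[k - j] == s[n - 1 - j]: j += 1`.
def pvScanB (cs : List Char) (n k j : Nat) : Nat :=
  if _h : j ≤ k ∧ cs.getD (k - j) ' ' = cs.getD (n - 1 - j) ' ' then
    pvScanB cs n k (j + 1)
  else j
termination_by k + 1 - j
decreasing_by omega

def rightToLeft_Z_algo_alt (s : String) : List (Option Int) :=
  let cs := s.toList
  let n := cs.length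
  if n = 0 then []
  else ((List.range (n - 1)).map (fun k => some ((pvScanB cs n k 0 : Nat) : Int))) ++ [none]

-- ===== PRECONDITION & SPEC =====
def Spec_rightToLeft_Z_algo (s : String) (out : List (Option Int)) : Prop := out = rightToLeft_Z_algo_alt s
instance (s : String) (out : List (Option Int)) : Decidable (Spec_rightToLeft_Z_algo s out) := by unfold Spec_rightToLeft_Z_algo; infer_instance

-- ===== CLAIM (what is proved, stated in full; the proofs are below) =====
def Claim_equal_rightToLeft_Z_algo : Prop := ∀ (s : String), Dom_rightToLeft_Z_algo s → Spec_rightToLeft_Z_algo s (rightToLeft_Z_algo s)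

-- ===== LEMMAS AND PROOFS =====

-- "position j still matches" predicate of B's scan at position k.
def pvP (cs : List Char) (n k j : Nat) : Prop :=
  j ≤ k ∧ cs.getD (k - j) ' ' = cs.getD (n - 1 - j) ' '

lemma pvScanB_ge (cs : List Char) (n k j : Nat) : j ≤ pvScanB cs n k j := by
  fun_induction pvScanB with
  | case1 j h ih => omega
  | case2 j h => omega

lemma pvScanB_matches (cs : List Char) (n k j : Nat) :
    ∀ i, j ≤ i → i < pvScanB cs n k j → pvP cs n k i := by
  fun_induction pvScanB with
  | case1 j h ih =>
    intro i hji hi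
    rcases Nat.eq_or_lt_of_le hji with rfl | hlt
    · exact h
    · exact ih i hlt hi
  | case2 j h => intro i h1 h2; omega

lemma pvScanB_not (cs : List Char) (n k j : Nat) :
    ¬ pvP cs n k (pvScanB cs n k j) := by
  fun_induction pvScanB with
  | case1 j h ih => exact ih
  | case2 j h => exact h

lemma pvScanB_step (cs : List Char) (n k j : Nat) (h : pvP cs n k j) :
    pvScanB cs n k j = pvScanB cs n k (j + 1) := by
  rw [pvScanB]; exact dif_pos h

lemma pvScanB_stop (cs : List Char) (n k j : Nat) (h : ¬ pvP cs n k j) :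
    pvScanB cs n k j = j := by
  rw [pvScanB]; exact dif_neg h

lemma pvScanB_segment (cs : List Char) (n k : Nat) :
    ∀ j' j, j ≤ j' → (∀ i, j ≤ i → i < j' → pvP cs n k i) →
      pvScanB cs n k j = pvScanB cs n k j' := by
  intro j'
  induction j' with
  | zero => intro j h _; interval_cases j; rfl
  | succ m ih =>
    intro j hj hall
    rcases Nat.eq_or_lt_of_le hj with rfl | hlt
    · rfl
    · have hjm : j ≤ m := by omega
      rw [ih j hjm (fun i hi hi2 => hall i hi (by omega)),
        pvScanB_step cs n k m (hall m hjm (by omega))]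

lemma pvScanB_eq_of (cs : List Char) (n k c : Nat)
    (h1 : ∀ i, i < c → pvP cs n k i) (h2 : ¬ pvP cs n k c) :
    pvScanB cs n k 0 = c := by
  rw [pvScanB_segment cs n k c 0 (Nat.zero_le _) (fun i _ hi => h1 i hi)]
  exact pvScanB_stop _ _ _ _ h2

lemma pvScanB_le (cs : List Char) (n k : Nat) : pvScanB cs n k 0 ≤ k + 1 := by
  by_contra h
  exact (pvScanB_matches cs n k 0 (k+1) (Nat.zero_le _) (by omega)).1.not_gt (by omega)

lemma pvScan2_eq (cs : List Char) (n k : Nat) (h2 : 2 ≤ n) (hk : k ≤ n - 2) :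
    ∀ fuel c, k + 1 - c ≤ fuel → c ≤ k →
      pvScan2 cs k (n - 1 - c) c = pvScanB cs n k c := by
  intro fuel
  induction fuel with
  | zero => intro c hf hc; omega
  | succ m ih =>
    intro c hf hc
    rw [pvScan2]
    by_cases hm : cs.getD (k - c) ' ' = cs.getD (n - 1 - c) ' '
    · rw [if_pos hm]
      have hP : pvP cs n k c := ⟨hc, hm⟩
      by_cases hbrk : n - 1 - c - 1 = 0 ∨ k < c + 1
      · rw [dif_pos hbrk]
        have hkc : k < c + 1 := by
          rcases hbrk with h | h
          · omega
          · exact h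
        rw [pvScanB_step cs n k c hP,
          pvScanB_stop cs n k (c+1) (fun hP2 => absurd hP2.1 (by omega))]
      · rw [dif_neg hbrk]
        have he : n - 1 - c - 1 = n - 1 - (c+1) := by omega
        rw [he, ih (c+1) (by omega) (by omega), pvScanB_step cs n k c hP]
    · rw [if_neg hm, pvScanB_stop cs n k c (fun hP => hm hP.2)]

lemma pvScan1_eq (cs : List Char) (n k : Nat) (h2 : 2 ≤ n) (hk : k ≤ n - 2) :
    ∀ fuel c, k + 1 - c ≤ fuel → c ≤ k →
      pvScan1 cs k (n - 1 - c) c = pvScanB cs n k c := by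
  intro fuel
  induction fuel with
  | zero => intro c hf hc; omega
  | succ m ih =>
    intro c hf hc
    rw [pvScan1]
    by_cases hm : cs.getD (k - c) ' ' = cs.getD (n - 1 - c) ' '
    · rw [dif_pos ⟨hc, hm.symm⟩]
      have hP : pvP cs n k c := ⟨hc, hm⟩
      by_cases hbrk : n - 1 - c - 1 = 0 ∨ k < c + 1
      · rw [dif_pos hbrk]
        have hkc : k < c + 1 := by
          rcases hbrk with h | h
          · omega
          · exact h
        rw [pvScanB_step cs n k c hP,
          pvScanB_stop cs n k (c+1) (fun hP2 => absurd hP2.1 (by omega))]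
      · rw [dif_neg hbrk]
        have he : n - 1 - c - 1 = n - 1 - (c+1) := by omega
        rw [he, ih (c+1) (by omega) (by omega), pvScanB_step cs n k c hP]
    · rw [dif_neg (fun h : _ ∧ _ => hm h.2.symm), pvScanB_stop cs n k c (fun hP => hm hP.2)]

-- getD through List.set
lemma pvGetD_set_self (Z : List Nat) (k v : Nat) (h : k < Z.length) :
    (Z.set k v).getD k 0 = v := by
  simp [List.getD_eq_getElem?_getD, h]

lemma pvGetD_set_ne (Z : List Nat) (k v j : Nat) (h : j ≠ k) :
    (Z.set k v).getD j 0 = Z.getD j 0 := by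
  simp [List.getD_eq_getElem?_getD, List.getElem?_set_ne (Ne.symm h)]

-- The loop invariant of A's main loop, holding before position k is processed.
def pvInv (cs : List Char) (n : Nat) (Z : List Nat) (l r k : Nat) : Prop :=
  Z.length = n - 1 ∧
  (∀ j, k < j → j < n - 1 → Z.getD j 0 = pvScanB cs n j 0) ∧
  k < l ∧ l ≤ n - 1 ∧
  (r ≤ k → l ≤ n - 2 ∧ r + pvScanB cs n l 0 = l + 1)

-- Z-box transfer: inside the box the text repeats the suffix-aligned copy.
lemma pvTransfer (cs : List Char) (n l r k : Nat) (hkl : k < l) (_hl : l ≤ n - 2)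
    (hbox : r + pvScanB cs n l 0 = l + 1) :
    ∀ i, i < k + 1 - r →
      cs.getD (k - i) ' ' = cs.getD (n - 1 - (l - k) - i) ' ' := by
  intro i hi
  obtain ⟨hle, heq⟩ := pvScanB_matches cs n l 0 ((l - k) + i) (Nat.zero_le _) (by omega)
  have e1 : l - ((l - k) + i) = k - i := by omega
  have e2 : n - 1 - ((l - k) + i) = n - 1 - (l - k) - i := by omega
  rw [e1, e2] at heq
  exact heq

lemma pvCase2a (cs : List Char) (n l r k : Nat) (h2 : 2 ≤ n) (_hk : k ≤ n - 2)
    (hkl : k < l) (hl : l ≤ n - 2) (hr : r ≤ k)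
    (hbox : r + pvScanB cs n l 0 = l + 1)
    (hlt : pvScanB cs n (n - 1 - (l - k)) 0 < k + 1 - r) :
    pvScanB cs n k 0 = pvScanB cs n (n - 1 - (l - k)) 0 := by
  apply pvScanB_eq_of
  · intro i hi
    obtain ⟨_, hmkp⟩ := pvScanB_matches cs n (n - 1 - (l - k)) 0 i (Nat.zero_le _) hi
    exact ⟨by omega, (pvTransfer cs n l r k hkl hl hbox i (by omega)).trans hmkp⟩
  · rintro ⟨hle, heq⟩
    apply pvScanB_not cs n (n - 1 - (l - k)) 0
    refine ⟨by omega, ?_⟩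
    rw [← pvTransfer cs n l r k hkl hl hbox (pvScanB cs n (n - 1 - (l - k)) 0) (by omega)]
    exact heq

lemma pvCase2bc (cs : List Char) (n l r k : Nat) (_h2 : 2 ≤ n) (_hk : k ≤ n - 2)
    (hkl : k < l) (_hl : l ≤ n - 2) (hr : r ≤ k)
    (hbox : r + pvScanB cs n l 0 = l + 1)
    (hge : k + 1 - r ≤ pvScanB cs n (n - 1 - (l - k)) 0) :
    ∀ i, i < k + 1 - r → pvP cs n k i := by
  intro i hi
  obtain ⟨_, hmkp⟩ := pvScanB_matches cs n (n - 1 - (l - k)) 0 i (Nat.zero_le _) (by omega)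
  exact ⟨by omega, (pvTransfer cs n l r k hkl _hl hbox i hi).trans hmkp⟩

lemma pvCase2c (cs : List Char) (n l r k : Nat) (h2 : 2 ≤ n) (hk : k ≤ n - 2)
    (hkl : k < l) (hl : l ≤ n - 2) (hr : r ≤ k)
    (hbox : r + pvScanB cs n l 0 = l + 1)
    (hgt : k + 1 - r < pvScanB cs n (n - 1 - (l - k)) 0) :
    pvScanB cs n k 0 = k + 1 - r := by
  apply pvScanB_eq_of
  · exact pvCase2bc cs n l r k h2 hk hkl hl hr hbox (by omega)
  · rintro ⟨hle, heq⟩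
    -- r ≥ 1 here, so the box match at l stops inside the string: a genuine mismatch
    have hzl : pvScanB cs n l 0 ≤ l := by omega
    have hnot := pvScanB_not cs n l 0
    have hmm : cs.getD (l - pvScanB cs n l 0) ' ' ≠ cs.getD (n - 1 - pvScanB cs n l 0) ' ' :=
      fun h => hnot ⟨hzl, h⟩
    obtain ⟨_, hmkp⟩ := pvScanB_matches cs n (n - 1 - (l - k)) 0 (k + 1 - r) (Nat.zero_le _) hgt
    have e1 : l - pvScanB cs n l 0 = k - (k + 1 - r) := by omega
    have e2 : n - 1 - pvScanB cs n l 0 = n - 1 - (l - k) - (k + 1 - r) := by omega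
    rw [e1, e2] at hmm
    exact hmm (heq.trans hmkp.symm)

lemma pvStep_correct (cs : List Char) (n : Nat) (Z : List Nat) (l r k : Nat)
    (h2 : 2 ≤ n) (hk : k ≤ n - 2) (hInv : pvInv cs n Z l r k) :
    ∃ l' r', pvStep cs n Z l r k = (Z.set k (pvScanB cs n k 0), l', r') ∧
      (1 ≤ k → pvInv cs n (Z.set k (pvScanB cs n k 0)) l' r' (k - 1)) := by
  obtain ⟨hlen, hZ, hkl, hln, hbox⟩ := hInv
  have hI2 : ∀ j, k - 1 < j → j < n - 1 →
      (Z.set k (pvScanB cs n k 0)).getD j 0 = pvScanB cs n j 0 := by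
    intro j hj1 hj2
    by_cases hjk : j = k
    · subst hjk; exact pvGetD_set_self Z j _ (by omega)
    · rw [pvGetD_set_ne Z k _ j hjk]; exact hZ j (by omega) hj2
  have hlen' : (Z.set k (pvScanB cs n k 0)).length = n - 1 := by
    rw [List.length_set]; exact hlen
  simp only [pvStep]
  by_cases hcase : k < r
  · have hscan : pvScan1 cs k (n - 1) 0 = pvScanB cs n k 0 := by
      have := pvScan1_eq cs n k h2 hk (k + 1) 0 (by omega) (by omega)
      rwa [Nat.sub_zero] at this
    rw [if_pos hcase, hscan]
    refine ⟨k, k + 1 - pvScanB cs n k 0, rfl, fun hk1 => ?_⟩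
    refine ⟨hlen', hI2, by omega, by omega, fun hrk => ⟨hk, ?_⟩⟩
    have := pvScanB_le cs n k
    omega
  · have hrk : r ≤ k := by omega
    obtain ⟨hl2, hb⟩ := hbox hrk
    have hkpgt : k < n - 1 - (l - k) := by omega
    have hkplt : n - 1 - (l - k) < n - 1 := by omega
    have hZkp : Z.getD (n - 1 - (l - k)) 0 = pvScanB cs n (n - 1 - (l - k)) 0 :=
      hZ _ hkpgt hkplt
    rw [if_neg hcase, hZkp]
    by_cases ha : pvScanB cs n (n - 1 - (l - k)) 0 < k + 1 - r
    · rw [if_pos ha, ← pvCase2a cs n l r k h2 hk hkl hl2 hrk hb ha]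
      refine ⟨l, r, rfl, fun hk1 => ?_⟩
      exact ⟨hlen', hI2, by omega, hln, fun hrk' => ⟨hl2, hb⟩⟩
    · rw [if_neg ha]
      by_cases hb2 : pvScanB cs n (n - 1 - (l - k)) 0 = k + 1 - r
      · rw [if_pos hb2]
        have hpre : ∀ i, i < k + 1 - r → pvP cs n k i :=
          pvCase2bc cs n l r k h2 hk hkl hl2 hrk hb (by omega)
        have hcnt :
            (if k + 1 - r ≤ k then pvScan2 cs k (n - 1 - (k + 1 - r)) (k + 1 - r)
             else k + 1 - r) = pvScanB cs n k 0 := by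
          by_cases hrem : k + 1 - r ≤ k
          · rw [if_pos hrem, pvScan2_eq cs n k h2 hk (k + 1) (k + 1 - r) (by omega) hrem]
            exact (pvScanB_segment cs n k (k + 1 - r) 0 (Nat.zero_le _)
              (fun i _ hi => hpre i hi)).symm
          · rw [if_neg hrem]
            exact (pvScanB_eq_of cs n k (k + 1 - r) hpre
              (fun hP => absurd hP.1 (by omega))).symm
        rw [hcnt]
        refine ⟨k, k + pvScanB cs n k 0 - 1, rfl, fun hk1 => ?_⟩
        have hnz : k + 1 - r ≤ pvScanB cs n k 0 := by
          rw [← hcnt]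
          by_cases hrem : k + 1 - r ≤ k
          · rw [if_pos hrem]
            have := pvScanB_ge cs n k (k + 1 - r)
            rw [← pvScan2_eq cs n k h2 hk (k + 1) (k + 1 - r) (by omega) hrem] at this
            exact this
          · rw [if_neg hrem]
        refine ⟨hlen', hI2, by omega, by omega, fun hw => absurd hw (by omega)⟩
      · rw [if_neg hb2, ← pvCase2c cs n l r k h2 hk hkl hl2 hrk hb (by omega)]
        refine ⟨l, r, rfl, fun hk1 => ?_⟩
        exact ⟨hlen', hI2, by omega, hln, fun hrk' => ⟨hl2, hb⟩⟩

lemma pvLoopA_correct (cs : List Char) (n : Nat) (h2 : 2 ≤ n) :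
    ∀ k Z l r, k ≤ n - 2 → pvInv cs n Z l r k →
      (pvLoopA cs n Z l r k).length = n - 1 ∧
      ∀ j, j < n - 1 → (pvLoopA cs n Z l r k).getD j 0 = pvScanB cs n j 0 := by
  intro k
  induction k with
  | zero =>
    intro Z l r hk hInv
    obtain ⟨l', r', hstep, _⟩ := pvStep_correct cs n Z l r 0 h2 hk hInv
    obtain ⟨hlen, hZ, _⟩ := hInv
    rw [pvLoopA, hstep]
    dsimp only
    refine ⟨by rw [List.length_set]; exact hlen, fun j hj => ?_⟩
    by_cases hj0 : j = 0
    · subst hj0; exact pvGetD_set_self Z 0 _ (by omega)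
    · rw [pvGetD_set_ne Z 0 _ j hj0]; exact hZ j (by omega) hj
  | succ k' ih =>
    intro Z l r hk hInv
    obtain ⟨l', r', hstep, hInv'⟩ := pvStep_correct cs n Z l r (k' + 1) h2 hk hInv
    rw [pvLoopA, hstep]
    dsimp only
    exact ih _ l' r' (by omega) (by simpa using hInv' (by omega))

-- ===== VERDICT (by name: the statement is the Claim_ definition above) =====
theorem rightToLeft_Z_algo_spec : Claim_equal_rightToLeft_Z_algo := by
  intro s _
  unfold Spec_rightToLeft_Z_algo rightToLeft_Z_algo rightToLeft_Z_algo_alt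
  simp only []
  by_cases h0 : s.toList.length = 0
  · simp [h0]
  · by_cases h1 : s.toList.length = 1
    · simp [h1]
    · have h2 : 2 ≤ s.toList.length := by omega
      simp only [if_neg h0, if_neg h1]
      obtain ⟨hlen, hval⟩ := pvLoopA_correct s.toList s.toList.length h2
        (s.toList.length - 2) (List.replicate (s.toList.length - 1) 0)
        (s.toList.length - 1) (s.toList.length - 1) (le_refl _)
        ⟨by rw [List.length_replicate], fun j hj1 hj2 => by omega,
          by omega, by omega, fun hr => by omega⟩
      congr 1
      apply List.ext_getElem
      · rw [List.length_map, List.length_map, List.length_range, hlen]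
      · intro j hja hjb
        rw [List.length_map, hlen] at hja
        simp only [List.getElem_map, List.getElem_range]
        have := hval j hja
        rw [List.getD_eq_getElem _ _ (by omega)] at this
        rw [this]
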